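-- pv_equiv track=rewrite | github.com/lubarog13/pythonProject | huffman.py | counting_sort_arg
-- ===== SOURCE A (Python) =====
-- def counting_sort_arg(S):
--     N = len(S)
--     M = 128
--     T = [0 for _ in range(M)]
--     T_sub = [0 for _ in range(M)]
--     # Массив счетчиков символов
--     for s in S:
--         T[ord(s)] += 1
--     # Массив индексов, с которым начинается последовательность повторяющихся символов
--     for j in range(1,M):
--         T_sub[j] = T_sub[j-1] + T[j-1]
--     P = [-1 for _ in range(N)]
--     P_inverse = [-1 for _ in range(N)]
--     for i in range(N):
--         P_inverse[T_sub[ord(S[i])]] = i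
--         P[i] = T_sub[ord(S[i])]
--         T_sub[ord(S[i])] +=1
--     return P_inverse
-- ===== SOURCE B (Python) =====
-- def counting_sort_arg(S):
--     buckets = [[] for _ in range(128)]
--     for i, s in enumerate(S):
--         buckets[ord(s)].append(i)
--     res = []
--     for b in buckets:
--         res.extend(b)
--     return res
-- ===== Notes on version B (the rewrite author's own statement) =====
-- stated objective: idiomatic
-- what changed: Replaces the count/prefix-sum/scatter-write counting sort (two counter arrays, then writes into a preallocated output via running start indices) by 128 bucket lists filled in one enumerate pass and concatenated in code-point order; no counter arithmetic or preallocated output.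
import Mathlib
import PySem

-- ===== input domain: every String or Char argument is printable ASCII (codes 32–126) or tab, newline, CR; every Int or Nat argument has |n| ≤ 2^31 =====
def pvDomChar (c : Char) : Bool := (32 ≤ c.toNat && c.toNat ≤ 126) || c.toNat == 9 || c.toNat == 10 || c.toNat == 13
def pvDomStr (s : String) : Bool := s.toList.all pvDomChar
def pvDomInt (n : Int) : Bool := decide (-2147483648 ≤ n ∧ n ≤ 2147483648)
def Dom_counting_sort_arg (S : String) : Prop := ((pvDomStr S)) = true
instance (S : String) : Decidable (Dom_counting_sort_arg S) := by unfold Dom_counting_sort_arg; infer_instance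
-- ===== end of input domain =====

-- B replaces A's count/prefix-sum/scatter counting sort by 128 bucket lists filled in one
-- enumerate pass and concatenated in code order (idiomatic restructuring, same cost).

-- ===== PORT A =====
def counting_sort_arg (S : String) : List Int :=
  let N : Int := PySem.List.len S.toList
  let M : Int := 128
  let T0 : List Int := (PySem.List.pyRange 0 M 1).map (fun _ => 0)
  let Tsub0 : List Int := (PySem.List.pyRange 0 M 1).map (fun _ => 0)
  let T : List Int := S.toList.foldl (fun t s =>
      PySem.List.pySetD t ((s.toNat : Int)) (PySem.List.pyGetD t ((s.toNat : Int)) 0 + 1)) T0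
  let Tsub : List Int := (PySem.List.pyRange 1 M 1).foldl (fun ts j =>
      PySem.List.pySetD ts j (PySem.List.pyGetD ts (j-1) 0 + PySem.List.pyGetD T (j-1) 0)) Tsub0
  let P0 : List Int := (PySem.List.pyRange 0 N 1).map (fun _ => (-1 : Int))
  let Pinv0 : List Int := (PySem.List.pyRange 0 N 1).map (fun _ => (-1 : Int))
  let st := (PySem.List.pyRange 0 N 1).foldl
      (fun (st : List Int × List Int × List Int) i =>
        let c : Int := ((PySem.List.pyGetD S.toList i ' ').toNat : Int)
        let pos : Int := PySem.List.pyGetD st.2.2 c 0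
        (PySem.List.pySetD st.1 pos i,
         PySem.List.pySetD st.2.1 i pos,
         PySem.List.pySetD st.2.2 c (pos + 1)))
      (Pinv0, P0, Tsub)
  st.1

-- ===== PORT B =====
def counting_sort_arg_alt (S : String) : List Int :=
  let buckets0 : List (List Int) := (List.range 128).map (fun _ => ([] : List Int))
  let buckets := (PySem.List.enumerate S.toList 0).foldl (fun bs p =>
      PySem.List.pySetD bs ((p.2.toNat : Int)) (PySem.List.pyGetD bs ((p.2.toNat : Int)) [] ++ [p.1])) buckets0
  buckets.foldl (fun res b => res ++ b) []

-- ===== PRECONDITION & SPEC =====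
def Spec_counting_sort_arg (S : String) (out : List Int) : Prop := out = counting_sort_arg_alt S
instance (S : String) (out : List Int) : Decidable (Spec_counting_sort_arg S out) := by unfold Spec_counting_sort_arg; infer_instance

-- ===== CLAIM (what is proved, stated in full; the proofs are below) =====
def Claim_equal_counting_sort_arg : Prop := ∀ (S : String), Dom_counting_sort_arg S → Spec_counting_sort_arg S (counting_sort_arg S)

-- ===== LEMMAS AND PROOFS =====

-- code of the k-th character (default ' ' keeps everything total; only k < length is used)
def pvCodeAt (cs : List Char) (k : Nat) : Nat := (cs.getD k ' ').toNat
-- indices below m whose character has code c, in increasing order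
def pvOccBel (cs : List Char) (m c : Nat) : List Nat :=
  (List.range m).filter (fun i => pvCodeAt cs i == c)
def pvPre (cs : List Char) (m c : Nat) : Nat := (pvOccBel cs m c).length
-- start offset of code c's block in the stable argsort
def pvOff (cs : List Char) (c : Nat) : Nat := ∑ d ∈ Finset.range c, pvPre cs cs.length d
-- the stable argsort itself (as Nat indices), and as Int
def pvNT (cs : List Char) : List Nat := (List.range 128).flatMap (fun c => pvOccBel cs cs.length c)
def pvTarget (cs : List Char) : List Int := List.map (fun k : Nat => (k : Int)) (pvNT cs)
-- position at which index k is placed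
def pvPos (cs : List Char) (k : Nat) : Nat := pvOff cs (pvCodeAt cs k) + pvPre cs k (pvCodeAt cs k)
-- P_inverse after k iterations of A's main loop
def pvPinv (cs : List Char) (k : Nat) : List Int :=
  (pvTarget cs).map (fun v => if v < (k : Int) then v else -1)

theorem pv_dom_codes {S : String} (h : Dom_counting_sort_arg S) :
    ∀ i, pvCodeAt S.toList i < 128 := by
  intro i
  unfold pvCodeAt
  rcases lt_or_ge i S.toList.length with hi | hi
  · have hm : S.toList.getD i ' ' ∈ S.toList := by
      rw [List.getD_eq_getElem _ _ hi]; exact List.getElem_mem hi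
    have := (List.all_eq_true.mp h) _ hm
    simp only [pvDomChar, Bool.or_eq_true, Bool.and_eq_true, decide_eq_true_eq, beq_iff_eq] at this
    omega
  · rw [List.getD_eq_default _ _ hi]; decide

theorem pv_getD_set {α : Type} (t : List α) (j c : Nat) (v d : α) (hj : j < t.length) :
    (t.set j v).getD c d = if c = j then v else t.getD c d := by
  rcases eq_or_ne j c with h1 | h1
  · subst h1
    rw [List.getD_eq_getElem?_getD, List.getElem?_set, if_pos rfl, if_pos hj, if_pos rfl]
    rfl
  · rw [List.getD_eq_getElem?_getD, List.getD_eq_getElem?_getD, List.getElem?_set,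
      if_neg h1, if_neg (Ne.symm h1)]

theorem pv_getD_map_const {α β : Type} (l : List β) (c : Nat) (v d : α) (hc : c < l.length) :
    (l.map (fun _ => v)).getD c d = v := by
  rw [List.getD_eq_getElem?_getD, List.getElem?_map, List.getElem?_eq_getElem hc]
  rfl

theorem pv_sum_map_range (g : Nat → Nat) (m : Nat) :
    ((List.range m).map g).sum = ∑ d ∈ Finset.range m, g d := by
  induction m with
  | zero => simp
  | succ m ih => rw [List.range_succ, List.map_append, List.sum_append, Finset.sum_range_succ, ih]; simp

theorem pvPre_zero (cs : List Char) (c : Nat) : pvPre cs 0 c = 0 := rfl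

theorem pvOccBel_succ (cs : List Char) (m c : Nat) :
    pvOccBel cs (m + 1) c = pvOccBel cs m c ++ if pvCodeAt cs m = c then [m] else [] := by
  unfold pvOccBel
  rw [List.range_succ, List.filter_append, List.filter_cons]
  simp only [List.filter_nil, beq_iff_eq]

theorem pvPre_succ (cs : List Char) (m c : Nat) :
    pvPre cs (m + 1) c = pvPre cs m c + if pvCodeAt cs m = c then 1 else 0 := by
  unfold pvPre
  rw [pvOccBel_succ, List.length_append]
  split_ifs <;> simp

theorem pvPre_mono (cs : List Char) (c : Nat) {m m' : Nat} (h : m ≤ m') :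
    pvPre cs m c ≤ pvPre cs m' c := by
  induction m' with
  | zero =>
    have hm : m = 0 := by omega
    subst hm; exact le_refl _
  | succ m' ih =>
    rcases Nat.eq_or_lt_of_le h with h' | h'
    · exact le_of_eq (by rw [h'])
    · have h2 := ih (Nat.lt_succ_iff.mp h')
      rw [pvPre_succ]; split_ifs <;> omega

theorem pvPre_lt_cnt (cs : List Char) {k c : Nat} (hk : k < cs.length)
    (hc : pvCodeAt cs k = c) : pvPre cs k c < pvPre cs cs.length c := by
  have h1 : pvPre cs (k + 1) c = pvPre cs k c + 1 := by rw [pvPre_succ]; simp [hc]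
  have h2 := pvPre_mono cs c (show k + 1 ≤ cs.length by omega)
  omega

theorem pv_sum_pre (cs : List Char) (hc : ∀ i, pvCodeAt cs i < 128) (m : Nat) :
    ∑ c ∈ Finset.range 128, pvPre cs m c = m := by
  induction m with
  | zero => simp [pvPre_zero]
  | succ m ih =>
    have : ∀ c ∈ Finset.range 128, pvPre cs (m+1) c
        = pvPre cs m c + if pvCodeAt cs m = c then 1 else 0 := fun c _ => pvPre_succ cs m c
    rw [Finset.sum_congr rfl this, Finset.sum_add_distrib, ih, Finset.sum_ite_eq]
    simp [Finset.mem_range.mpr (hc m)]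

theorem pvOff_succ (cs : List Char) (c : Nat) :
    pvOff cs (c + 1) = pvOff cs c + pvPre cs cs.length c := Finset.sum_range_succ _ c

theorem pvNT_length (cs : List Char) (hc : ∀ i, pvCodeAt cs i < 128) :
    (pvNT cs).length = cs.length := by
  unfold pvNT
  rw [List.length_flatMap]
  have : (fun c => (pvOccBel cs cs.length c).length) = fun c => pvPre cs cs.length c := rfl
  rw [this, pv_sum_map_range, pv_sum_pre cs hc]

theorem pvNT_block (cs : List Char) {c r : Nat} (hc : c < 128)
    (hr : r < pvPre cs cs.length c) :
    (pvNT cs)[pvOff cs c + r]? = (pvOccBel cs cs.length c)[r]? := by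
  unfold pvNT
  have h128 : 128 = c + (128 - c) := by omega
  rw [h128, List.range_add, List.flatMap_append]
  have hlen : ((List.range c).flatMap (fun d => pvOccBel cs cs.length d)).length = pvOff cs c := by
    rw [List.length_flatMap]
    have : (fun d => (pvOccBel cs cs.length d).length) = fun d => pvPre cs cs.length d := rfl
    rw [this, pv_sum_map_range]; rfl
  rw [List.getElem?_append_right (by omega), hlen, Nat.add_sub_cancel_left]
  have h2 : 128 - c = (127 - c) + 1 := by omega
  rw [h2, List.range_succ_eq_map, List.map_cons, List.flatMap_cons, Nat.add_zero]
  exact List.getElem?_append_left hr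

theorem pvOccBel_getElem (cs : List Char) {k c : Nat} (hk : k < cs.length)
    (hc : pvCodeAt cs k = c) :
    (pvOccBel cs cs.length c)[pvPre cs k c]? = some k := by
  have hsplit : cs.length = k + (cs.length - k - 1 + 1) := by omega
  unfold pvPre pvOccBel
  conv_lhs => rw [hsplit]
  rw [List.range_add, List.filter_append, List.range_succ_eq_map, List.map_cons,
    List.filter_cons]
  simp only [Nat.add_zero, hc, beq_self_eq_true, if_true]
  rw [List.getElem?_append_right (le_refl _), Nat.sub_self]
  rfl

theorem pvNT_pos (cs : List Char) (hc : ∀ i, pvCodeAt cs i < 128) {k : Nat}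
    (hk : k < cs.length) : (pvNT cs)[pvPos cs k]? = some k := by
  unfold pvPos
  rw [pvNT_block cs (hc k) (pvPre_lt_cnt cs hk rfl)]
  exact pvOccBel_getElem cs hk rfl

theorem pvPos_lt (cs : List Char) (hc : ∀ i, pvCodeAt cs i < 128) {k : Nat}
    (hk : k < cs.length) : pvPos cs k < cs.length := by
  have h := pvNT_pos cs hc hk
  rw [List.getElem?_eq_some_iff] at h
  obtain ⟨h1, _⟩ := h
  rwa [pvNT_length cs hc] at h1

theorem pvPos_inj (cs : List Char) (hc : ∀ i, pvCodeAt cs i < 128) {k k' : Nat}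
    (hk : k < cs.length) (hk' : k' < cs.length) (h : pvPos cs k = pvPos cs k') : k = k' := by
  have h1 := pvNT_pos cs hc hk
  have h2 := pvNT_pos cs hc hk'
  rw [h] at h1
  rw [h1] at h2
  exact Option.some.inj h2

theorem pvPos_surj (cs : List Char) (hc : ∀ i, pvCodeAt cs i < 128) {q : Nat}
    (hq : q < cs.length) : ∃ k, k < cs.length ∧ pvPos cs k = q := by
  classical
  set f : Nat → Nat := pvPos cs with hf
  have himg : (Finset.range cs.length).image f = Finset.range cs.length := by
    apply Finset.eq_of_subset_of_card_le
    · intro x hx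
      rw [Finset.mem_image] at hx
      obtain ⟨k, hk, rfl⟩ := hx
      exact Finset.mem_range.mpr (pvPos_lt cs hc (Finset.mem_range.mp hk))
    · rw [Finset.card_image_of_injOn, Finset.card_range]
      intro a ha b hb hab
      exact pvPos_inj cs hc (Finset.mem_range.mp ha) (Finset.mem_range.mp hb) hab
  have : q ∈ (Finset.range cs.length).image f := by rw [himg]; exact Finset.mem_range.mpr hq
  rw [Finset.mem_image] at this
  obtain ⟨k, hk, hfk⟩ := this
  exact ⟨k, Finset.mem_range.mp hk, hfk⟩

theorem pvNT_val (cs : List Char) (hc : ∀ i, pvCodeAt cs i < 128) {q : Nat}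
    (hq : q < cs.length) : ∃ k, k < cs.length ∧ pvPos cs k = q ∧ (pvNT cs)[q]? = some k := by
  obtain ⟨k, hk, hpk⟩ := pvPos_surj cs hc hq
  exact ⟨k, hk, hpk, by rw [← hpk]; exact pvNT_pos cs hc hk⟩

-- ===== A-side loop characterisations =====

theorem pvA_count_loop :
    ∀ (l : List Char) (t : List Int), t.length = 128 → (∀ ch ∈ l, ch.toNat < 128) →
    (l.foldl (fun t s => PySem.List.pySetD t ((s.toNat : Int))
        (PySem.List.pyGetD t ((s.toNat : Int)) 0 + 1)) t).length = 128 ∧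
    ∀ c < 128, (l.foldl (fun t s => PySem.List.pySetD t ((s.toNat : Int))
        (PySem.List.pyGetD t ((s.toNat : Int)) 0 + 1)) t).getD c 0
      = t.getD c 0 + (l.countP (fun s => s.toNat == c) : Int) := by
  intro l
  induction l with
  | nil => intro t ht _; simp [ht]
  | cons x xs ih =>
    intro t ht hlt
    have hx : x.toNat < 128 := hlt x (by simp)
    simp only [List.foldl_cons, PySem.List.pyGetD_natCast, PySem.List.pySetD_natCast]
    obtain ⟨h1, h2⟩ := ih (t.set x.toNat (t.getD x.toNat 0 + 1)) (by simp [ht])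
      (fun ch hch => hlt ch (by simp [hch]))
    simp only [PySem.List.pyGetD_natCast, PySem.List.pySetD_natCast] at h1 h2
    refine ⟨h1, fun c hcc => ?_⟩
    rw [h2 c hcc, pv_getD_set t x.toNat c _ 0 (by omega), List.countP_cons]
    rcases eq_or_ne c x.toNat with hcx | hcx
    · subst hcx
      simp only [beq_self_eq_true, ]
      push_cast
      ring
    · rw [if_neg hcx]
      have hb : (x.toNat == c) = false := by simp [Ne.symm hcx]
      rw [hb]
      push_cast
      ring

theorem pvA_prefix_loop (cs : List Char) (T : List Int)
    (hT : ∀ c < 128, T.getD c 0 = (pvPre cs cs.length c : Int))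
    (ts0 : List Int) (h0len : ts0.length = 128) (h0 : ∀ c < 128, ts0.getD c 0 = 0) :
    ∀ m : Nat, 1 ≤ m → m ≤ 128 →
    ((PySem.List.pyRange 1 (m : Int) 1).foldl (fun ts j =>
      PySem.List.pySetD ts j (PySem.List.pyGetD ts (j-1) 0 + PySem.List.pyGetD T (j-1) 0)) ts0).length = 128 ∧
    ∀ c < 128, ((PySem.List.pyRange 1 (m : Int) 1).foldl (fun ts j =>
      PySem.List.pySetD ts j (PySem.List.pyGetD ts (j-1) 0 + PySem.List.pyGetD T (j-1) 0)) ts0).getD c 0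
      = if c < m then (pvOff cs c : Int) else 0 := by
  intro m
  induction m with
  | zero => omega
  | succ m ih =>
    intro _ h128
    rcases Nat.eq_zero_or_pos m with hm | hm
    · subst hm
      have hnil : PySem.List.pyRange 1 ((1:Nat) : Int) 1 = [] := by
        rw [show (((1:Nat)):Int) = (1:Int) by norm_num]
        exact PySem.List.pyRange_one_eq_nil (le_refl _)
      rw [hnil, List.foldl_nil]
      refine ⟨h0len, fun c hc => ?_⟩
      rw [h0 c hc]
      split_ifs with h
      · have : c = 0 := by omega
        subst this
        simp [pvOff]
      · rfl
    · obtain ⟨ihlen, ihval⟩ := ih (by omega) (by omega)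
      have hcast : (((m+1:Nat)) : Int) = ((m:Nat) : Int) + 1 := by push_cast; ring
      rw [hcast, PySem.List.pyRange_one_succ_right (by exact_mod_cast hm), List.foldl_append,
        List.foldl_cons, List.foldl_nil]
      set ts := ((PySem.List.pyRange 1 ((m:Nat) : Int) 1).foldl (fun ts j =>
        PySem.List.pySetD ts j (PySem.List.pyGetD ts (j-1) 0 + PySem.List.pyGetD T (j-1) 0)) ts0) with hts
      have hm1 : ((m:Nat) : Int) - 1 = (((m-1 : Nat)) : Int) := by omega
      rw [hm1, PySem.List.pyGetD_natCast, PySem.List.pyGetD_natCast, PySem.List.pySetD_natCast]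
      have hval : ts.getD (m-1) 0 + T.getD (m-1) 0 = ((pvOff cs m : Nat) : Int) := by
        rw [ihval (m-1) (by omega), if_pos (by omega), hT (m-1) (by omega)]
        have : pvOff cs ((m-1)+1) = pvOff cs (m-1) + pvPre cs cs.length (m-1) := pvOff_succ cs (m-1)
        rw [show (m-1)+1 = m by omega] at this
        rw [this]
        push_cast
        ring
      rw [hval]
      refine ⟨by rw [List.length_set]; exact ihlen, fun c hc => ?_⟩
      rw [pv_getD_set ts m c _ 0 (by omega)]
      rcases eq_or_ne c m with hcm | hcm
      · subst hcm
        rw [if_pos rfl, if_pos (by omega)]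
      · rw [if_neg hcm, ihval c hc]
        split_ifs with hh1 hh2 hh2 <;> first | rfl | omega

theorem pvTarget_length (cs : List Char) (hc : ∀ i, pvCodeAt cs i < 128) :
    (pvTarget cs).length = cs.length := by
  unfold pvTarget
  rw [List.length_map]
  exact pvNT_length cs hc

theorem pvTarget_getElem (cs : List Char) {q : Nat} {v : Nat}
    (hv : (pvNT cs)[q]? = some v) (hq : q < (pvTarget cs).length) :
    (pvTarget cs)[q] = ((v : Nat) : Int) := by
  unfold pvTarget
  rw [List.getElem_map]
  congr 1
  have hq' : q < (pvNT cs).length := by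
    unfold pvTarget at hq
    rwa [List.length_map] at hq
  rw [List.getElem?_eq_getElem hq'] at hv
  exact Option.some.inj hv

theorem pvPinv_length (cs : List Char) (k : Nat) :
    (pvPinv cs k).length = (pvTarget cs).length := by
  unfold pvPinv
  rw [List.length_map]

theorem pvPinv_succ (cs : List Char) (hc : ∀ i, pvCodeAt cs i < 128) {k : Nat}
    (hk : k < cs.length) :
    (pvPinv cs k).set (pvPos cs k) ((k : Nat) : Int) = pvPinv cs (k + 1) := by
  apply List.ext_getElem
  · rw [List.length_set, pvPinv_length, pvPinv_length]
  intro q hq1 hq2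
  have hqt : q < (pvTarget cs).length := by rwa [pvPinv_length] at hq2
  have hqn : q < cs.length := by rwa [pvTarget_length cs hc] at hqt
  obtain ⟨v, hvn, hpv, hval⟩ := pvNT_val cs hc hqn
  have htq : (pvTarget cs)[q] = ((v : Nat) : Int) := pvTarget_getElem cs hval hqt
  rw [List.getElem_set]
  unfold pvPinv
  rw [List.getElem_map, List.getElem_map, htq]
  rcases eq_or_ne (pvPos cs k) q with hpq | hpq
  · rw [if_pos hpq]
    have hvk : v = k := pvPos_inj cs hc hvn hk (by rw [hpv, hpq])
    subst hvk
    rw [if_pos (by omega)]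
  · rw [if_neg hpq]
    have hvk : v ≠ k := by
      intro hvv
      subst hvv
      exact hpq (by rw [← hpv])
    split_ifs with h1 h2 h2 <;> first | rfl | (exfalso; push_cast at h1 h2; omega)

theorem pvPinv_zero (cs : List Char) (hc : ∀ i, pvCodeAt cs i < 128) :
    (PySem.List.pyRange 0 ((cs.length : Nat) : Int) 1).map (fun _ => (-1 : Int)) = pvPinv cs 0 := by
  apply List.ext_getElem
  · rw [List.length_map, pvPinv_length, pvTarget_length cs hc, PySem.List.pyRange_zero_nat,
      List.length_map, List.length_range]
  intro q hq1 hq2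
  rw [List.getElem_map]
  unfold pvPinv
  rw [List.getElem_map]
  have hqt : q < (pvTarget cs).length := by rwa [pvPinv_length] at hq2
  have hqn : q < cs.length := by rwa [pvTarget_length cs hc] at hqt
  obtain ⟨v, hvn, hpv, hval⟩ := pvNT_val cs hc hqn
  rw [pvTarget_getElem cs hval hqt, if_neg (by push_cast; omega)]

theorem pvPinv_full (cs : List Char) (hc : ∀ i, pvCodeAt cs i < 128) :
    pvPinv cs cs.length = pvTarget cs := by
  apply List.ext_getElem
  · exact pvPinv_length cs cs.length
  intro q hq1 hq2
  unfold pvPinv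
  rw [List.getElem_map]
  have hqn : q < cs.length := by rwa [pvTarget_length cs hc] at hq2
  obtain ⟨v, hvn, hpv, hval⟩ := pvNT_val cs hc hqn
  rw [pvTarget_getElem cs hval hq2, if_pos (by omega)]

theorem pvA_main_loop (cs : List Char) (hc : ∀ i, pvCodeAt cs i < 128)
    (ts0 : List Int) (hlen : ts0.length = 128)
    (hts : ∀ c < 128, ts0.getD c 0 = (pvOff cs c : Int)) (p0 : List Int) :
    ∀ k : Nat, k ≤ cs.length →
    ∃ pA ts, ((PySem.List.pyRange 0 (k : Int) 1).foldl
      (fun (st : List Int × List Int × List Int) i =>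
        (PySem.List.pySetD st.1 (PySem.List.pyGetD st.2.2 (((PySem.List.pyGetD cs i ' ').toNat : Int)) 0) i,
         PySem.List.pySetD st.2.1 i (PySem.List.pyGetD st.2.2 (((PySem.List.pyGetD cs i ' ').toNat : Int)) 0),
         PySem.List.pySetD st.2.2 (((PySem.List.pyGetD cs i ' ').toNat : Int))
           (PySem.List.pyGetD st.2.2 (((PySem.List.pyGetD cs i ' ').toNat : Int)) 0 + 1)))
      (pvPinv cs 0, p0, ts0)) = (pvPinv cs k, pA, ts) ∧ ts.length = 128 ∧
      ∀ c < 128, ts.getD c 0 = ((pvOff cs c + pvPre cs k c : Nat) : Int) := by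
  intro k
  induction k with
  | zero =>
    intro _
    refine ⟨p0, ts0, ?_, hlen, fun c hcc => ?_⟩
    · rw [show (((0:Nat)):Int) = (0:Int) by norm_num, PySem.List.pyRange_one_eq_nil (le_refl _),
        List.foldl_nil]
    · rw [pvPre_zero, Nat.add_zero, hts c hcc]
  | succ k ih =>
    intro hk1
    obtain ⟨pA, ts, heq, htlen, htval⟩ := ih (by omega)
    have hkn : k < cs.length := by omega
    have hcast : (((k+1:Nat)) : Int) = ((k:Nat) : Int) + 1 := by push_cast; ring
    rw [hcast, PySem.List.pyRange_one_succ_right (by positivity), List.foldl_append, heq,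
      List.foldl_cons, List.foldl_nil]
    rw [PySem.List.pyGetD_natCast cs k ' ',
      show ((cs.getD k ' ').toNat) = pvCodeAt cs k from rfl,
      PySem.List.pyGetD_natCast ts (pvCodeAt cs k) 0]
    have hpos : ts.getD (pvCodeAt cs k) 0 = ((pvPos cs k : Nat) : Int) := by
      rw [htval (pvCodeAt cs k) (hc k)]
      rfl
    rw [hpos, PySem.List.pySetD_natCast, PySem.List.pySetD_natCast, PySem.List.pySetD_natCast]
    refine ⟨pA.set k ((pvPos cs k : Nat) : Int),
      ts.set (pvCodeAt cs k) (((pvPos cs k : Nat) : Int) + 1), ?_, ?_, ?_⟩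
    · rw [pvPinv_succ cs hc hkn]
    · rw [List.length_set]; exact htlen
    · intro c hcc
      rw [pv_getD_set ts (pvCodeAt cs k) c _ 0 (by rw [htlen]; exact hc k)]
      rcases eq_or_ne c (pvCodeAt cs k) with hcx | hcx
      · rw [if_pos hcx]
        subst hcx
        rw [pvPre_succ cs k _, if_pos rfl,
          show pvPos cs k = pvOff cs (pvCodeAt cs k) + pvPre cs k (pvCodeAt cs k) from rfl]
        push_cast
        ring
      · rw [if_neg hcx, htval c hcc, pvPre_succ cs k c, if_neg (fun h => hcx h.symm)]
        norm_num

theorem pv_map_getD_range (cs : List Char) :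
    (List.range cs.length).map (fun i => cs.getD i ' ') = cs := by
  apply List.ext_getElem
  · simp
  intro q h1 h2
  simp only [List.getElem_map, List.getElem_range]
  rw [List.getD_eq_getElem _ _ h2]

theorem pv_countP_eq_pre (cs : List Char) (c : Nat) :
    cs.countP (fun s => s.toNat == c) = pvPre cs cs.length c := by
  unfold pvPre pvOccBel
  rw [← List.countP_eq_length_filter]
  conv_lhs => rw [← pv_map_getD_range cs]
  rw [List.countP_map]
  rfl

theorem pvA_eq_target (S : String) (h : Dom_counting_sort_arg S) :
    counting_sort_arg S = pvTarget S.toList := by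
  have hc := pv_dom_codes h
  have hall : ∀ ch ∈ S.toList, ch.toNat < 128 := by
    intro ch hch
    obtain ⟨i, hi, rfl⟩ := List.getElem_of_mem hch
    have := hc i
    unfold pvCodeAt at this
    rwa [List.getD_eq_getElem _ _ hi] at this
  unfold counting_sort_arg
  simp only [PySem.List.len_eq]
  rw [show (128 : Int) = ((128 : Nat) : Int) from by norm_num]
  rw [pvPinv_zero S.toList hc]
  have hT0len : (List.map (fun _ => (0 : Int)) (PySem.List.pyRange 0 ((128 : Nat) : Int) 1)).length = 128 := by
    rw [List.length_map, PySem.List.length_pyRange_one]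
    decide
  have hT0val : ∀ c < 128, (List.map (fun _ => (0 : Int)) (PySem.List.pyRange 0 ((128 : Nat) : Int) 1)).getD c 0 = 0 :=
    fun c hcc => pv_getD_map_const _ c 0 0 (by rw [PySem.List.length_pyRange_one]; omega)
  obtain ⟨hTlen, hTval⟩ := pvA_count_loop S.toList
    (List.map (fun _ => (0 : Int)) (PySem.List.pyRange 0 ((128 : Nat) : Int) 1)) hT0len hall
  have hT : ∀ c < 128, (S.toList.foldl (fun t s => PySem.List.pySetD t ((s.toNat : Int))
      (PySem.List.pyGetD t ((s.toNat : Int)) 0 + 1))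
      (List.map (fun _ => (0 : Int)) (PySem.List.pyRange 0 ((128 : Nat) : Int) 1))).getD c 0
      = ((pvPre S.toList S.toList.length c : Nat) : Int) := by
    intro c hcc
    rw [hTval c hcc, hT0val c hcc, pv_countP_eq_pre S.toList c]
    ring
  obtain ⟨hTsLen, hTsVal⟩ := pvA_prefix_loop S.toList _ hT _ hT0len hT0val 128 (by norm_num) (by norm_num)
  have hts : ∀ c < 128, ((PySem.List.pyRange 1 ((128 : Nat) : Int) 1).foldl (fun ts j =>
      PySem.List.pySetD ts j (PySem.List.pyGetD ts (j-1) 0 +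
        PySem.List.pyGetD (S.toList.foldl (fun t s => PySem.List.pySetD t ((s.toNat : Int))
          (PySem.List.pyGetD t ((s.toNat : Int)) 0 + 1))
          (List.map (fun _ => (0 : Int)) (PySem.List.pyRange 0 ((128 : Nat) : Int) 1))) (j-1) 0))
      (List.map (fun _ => (0 : Int)) (PySem.List.pyRange 0 ((128 : Nat) : Int) 1))).getD c 0
      = ((pvOff S.toList c : Nat) : Int) := by
    intro c hcc
    rw [hTsVal c hcc, if_pos hcc]
  obtain ⟨pA, ts, heq, _, _⟩ := pvA_main_loop S.toList hc _ hTsLen hts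
    (pvPinv S.toList 0) S.toList.length (le_refl _)
  rw [heq]
  exact pvPinv_full S.toList hc

-- ===== B-side loop characterisations =====

theorem pvB_bucket_loop :
    ∀ (l : List Char) (s : Int) (bs : List (List Int)), bs.length = 128 →
      (∀ ch ∈ l, ch.toNat < 128) →
    ((PySem.List.enumerate l s).foldl (fun bs p =>
      PySem.List.pySetD bs ((p.2.toNat : Int)) (PySem.List.pyGetD bs ((p.2.toNat : Int)) [] ++ [p.1])) bs).length = 128 ∧
    ∀ c < 128, ((PySem.List.enumerate l s).foldl (fun bs p =>
      PySem.List.pySetD bs ((p.2.toNat : Int)) (PySem.List.pyGetD bs ((p.2.toNat : Int)) [] ++ [p.1])) bs).getD c []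
      = bs.getD c [] ++ ((PySem.List.enumerate l s).filter (fun p => p.2.toNat == c)).map (·.1) := by
  intro l
  induction l with
  | nil =>
    intro s bs hlen _
    rw [PySem.List.enumerate_nil]
    simp [hlen]
  | cons x xs ih =>
    intro s bs hlen hallx
    have hx : x.toNat < 128 := hallx x (by simp)
    rw [PySem.List.enumerate_cons, List.foldl_cons]
    dsimp only
    simp only [PySem.List.pyGetD_natCast, PySem.List.pySetD_natCast]
    obtain ⟨ih1, ih2⟩ := ih (s + 1) (bs.set x.toNat (bs.getD x.toNat [] ++ [s]))
      (by rw [List.length_set]; exact hlen) (fun ch hch => hallx ch (by simp [hch]))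
    simp only [PySem.List.pyGetD_natCast, PySem.List.pySetD_natCast] at ih1 ih2
    refine ⟨ih1, fun c hcc => ?_⟩
    rw [ih2 c hcc, pv_getD_set bs x.toNat c _ [] (by omega), List.filter_cons]
    rcases eq_or_ne c x.toNat with hcx | hcx
    · subst hcx
      simp [List.append_assoc]
    · have hb : (x.toNat == c) = false := by simp [Ne.symm hcx]
      rw [if_neg hcx]
      simp only [hb, Bool.false_eq_true, if_false]

theorem pvB_eq_target (S : String) (h : Dom_counting_sort_arg S) :
    counting_sort_arg_alt S = pvTarget S.toList := by
  have hc := pv_dom_codes h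
  have hall : ∀ ch ∈ S.toList, ch.toNat < 128 := by
    intro ch hch
    obtain ⟨i, hi, rfl⟩ := List.getElem_of_mem hch
    have := hc i
    unfold pvCodeAt at this
    rwa [List.getD_eq_getElem _ _ hi] at this
  unfold counting_sort_arg_alt
  have h0len : ((List.range 128).map (fun _ => ([] : List Int))).length = 128 := by simp
  have h0val : ∀ c < 128, ((List.range 128).map (fun _ => ([] : List Int))).getD c [] = [] :=
    fun c hcc => pv_getD_map_const _ c [] [] (by simpa using hcc)
  obtain ⟨hBlen, hBval⟩ := pvB_bucket_loop S.toList 0 _ h0len hall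
  rw [PySem.List.foldl_append_eq_flatten, List.nil_append]
  have hsel : ∀ c : Nat, (((PySem.List.enumerate S.toList 0).filter
      (fun p => p.2.toNat == c)).map (·.1))
      = List.map (fun k : Nat => (k : Int)) (pvOccBel S.toList S.toList.length c) := by
    intro c
    rw [PySem.List.enumerate_eq_map_pyRange S.toList ' ', PySem.List.len_eq,
      PySem.List.pyRange_zero_nat, List.map_map, List.filter_map, List.map_map]
    unfold pvOccBel
    simp [Function.comp_def, PySem.List.pyGetD_natCast, pvCodeAt]
  set B := (PySem.List.enumerate S.toList 0).foldl (fun bs p =>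
      PySem.List.pySetD bs ((p.2.toNat : Int)) (PySem.List.pyGetD bs ((p.2.toNat : Int)) [] ++ [p.1]))
      ((List.range 128).map (fun _ => ([] : List Int))) with hBdef
  have hbk : B = (List.range 128).map (fun c => B.getD c []) := by
    apply List.ext_getElem
    · rw [List.length_map, List.length_range, hBlen]
    intro q h1 h2
    rw [List.getElem_map, List.getElem_range]
    rw [List.getD_eq_getElem _ _ h1]
  rw [hbk]
  unfold pvTarget pvNT
  rw [List.map_flatMap, List.flatMap_def]
  congr 1
  apply List.map_congr_left
  intro c hcr
  have hcc : c < 128 := List.mem_range.mp hcr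
  rw [hBval c hcc, h0val c hcc, List.nil_append, hsel c]

-- ===== VERDICT (by name: the statement is the Claim_ definition above) =====
theorem counting_sort_arg_spec : Claim_equal_counting_sort_arg := by
  intro S h
  unfold Spec_counting_sort_arg
  rw [pvA_eq_target S h, pvB_eq_target S h]
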